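-- pv_equiv track=rewrite | github.com/hughmancoder/computer-science-theory | Problems/graph/sharedInterest.py | sharedInterest
-- ===== SOURCE A (Python) =====
-- def sharedInterest(friends_nodes, friends_edges, friends_from, friends_to, friends_weight):
--     """
--     This function takes a graph of friends who have different interests and determines which groups of friends have the most interests in common.
--     It then multiplies the friends_nodes of the resulting node pairs and returns the maximal product.
--
--     Parameters:
--     friends_nodes (int): The number of nodes in the graph.
--     friends_edges (int): The number of edges in the graph.
--     friends_from (list): A list of integers representing the starting nodes of the edges.
--     friends_to (list): A list of integers representing the ending nodes of the edges.
--     friends_weight (list): A list of integers representing the weights of the edges.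
--
--     Returns:
--     int: The maximal product of the friends_nodes of the node pairs with the maximum number of shared interests.
--     """
--     connections = {}
--
--     for i in range(friends_edges):
--         pair = tuple(sorted([friends_from[i], friends_to[i]]))
--         if pair not in connections:
--             connections[pair] = set()
--         connections[pair].add(friends_weight[i])
--
--     # find pairs of friends with the most shared interests
--     max_shared_interests = max(len(interests) for interests in connections.values())
--     pairs_with_max_shared_interests = [pair for pair, interests in connections.items() if len(interests) == max_shared_interests]
--
--     # calculate product of node numbers for each pair of friends with the most shared interests
--     return max([pair[0] * pair[1] for pair in pairs_with_max_shared_interests])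
--
--     return 0
-- ===== SOURCE B (Python) =====
-- def sharedInterest(friends_nodes, friends_edges, friends_from, friends_to, friends_weight):
--     # Dictionary-free partition group-by: repeatedly peel the first remaining
--     # friend pair off the triple list, counting its distinct weights while
--     # splitting off the other triples; a running best replaces A's dict of
--     # per-pair sets and its three staged max/filter/max passes.
--     triples = []
--     for i in range(friends_edges):
--         u, v = friends_from[i], friends_to[i]
--         if v < u:
--             u, v = v, u
--         triples.append(((u, v), friends_weight[i]))
--
--     best_c, best_p = 0, 0
--     ts = triples
--     while ts:
--         p = ts[0][0]
--         ws = set()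
--         rest = []
--         for (q, w) in ts:
--             if q == p:
--                 ws.add(w)
--             else:
--                 rest.append((q, w))
--         c, pr = len(ws), p[0] * p[1]
--         if c > best_c or (c == best_c and pr > best_p):
--             best_c, best_p = c, pr
--         ts = rest
--     return best_p
-- ===== Notes on version B (the rewrite author's own statement) =====
-- stated objective: alternative
-- what changed: B replaces A's hash-dict of per-pair weight-sets plus three staged read passes (max of set sizes, filter of maximal pairs, max of products) with a dictionary-free partition group-by: it repeatedly peels the first remaining pair off the triple list, counting that pair's distinct weights while splitting off the rest, and keeps a running (best_count, best_product).
import Mathlib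
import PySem

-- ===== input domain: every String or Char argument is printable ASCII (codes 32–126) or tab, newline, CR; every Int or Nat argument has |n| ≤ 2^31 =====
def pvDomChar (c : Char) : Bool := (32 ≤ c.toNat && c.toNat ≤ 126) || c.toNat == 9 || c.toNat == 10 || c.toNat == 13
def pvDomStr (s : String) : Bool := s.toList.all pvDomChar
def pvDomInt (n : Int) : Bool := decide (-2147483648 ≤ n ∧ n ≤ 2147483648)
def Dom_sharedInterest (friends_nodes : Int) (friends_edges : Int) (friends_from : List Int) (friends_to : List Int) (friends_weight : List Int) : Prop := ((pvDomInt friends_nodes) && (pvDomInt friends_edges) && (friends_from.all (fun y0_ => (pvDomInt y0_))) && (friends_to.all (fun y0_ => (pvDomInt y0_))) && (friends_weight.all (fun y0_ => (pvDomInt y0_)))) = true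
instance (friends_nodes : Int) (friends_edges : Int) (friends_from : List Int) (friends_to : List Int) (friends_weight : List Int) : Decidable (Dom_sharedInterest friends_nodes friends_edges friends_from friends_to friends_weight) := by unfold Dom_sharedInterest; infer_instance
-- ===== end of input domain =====

-- B replaces A's dict of per-pair weight-sets and three staged read passes by a
-- dictionary-free partition group-by with a running best; same return value on Pre_.

-- ===== PORT A =====
def sharedInterest (friends_nodes : Int) (friends_edges : Int) (friends_from : List Int) (friends_to : List Int) (friends_weight : List Int) : Int :=
  -- for i in range(friends_edges): pair = tuple(sorted([ff[i], ft[i]])); …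
  let connections : PySem.Dict (Int × Int) (PySem.Set Int) :=
    (PySem.List.pyRange 0 friends_edges 1).foldl (fun d i =>
      let a := (PySem.List.pyGet? friends_from i).getD 0
      let b := (PySem.List.pyGet? friends_to i).getD 0
      let pair : Int × Int := if b < a then (b, a) else (a, b)
      let d := if d.contains pair then d else d.insert pair PySem.Set.empty
      -- connections[pair].add(w); pair is always present here, so modify is exact
      d.modify pair PySem.Set.empty (fun s => PySem.Set.add s ((PySem.List.pyGet? friends_weight i).getD 0)))
      PySem.Dict.empty
  -- max(len(interests) for interests in connections.values())  (ValueError on empty → Pre_)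
  let maxShared := (PySem.List.max? (connections.values.map (fun s => PySem.Set.len s)) (fun x => x)).getD 0
  -- [pair for pair, interests in connections.items() if len(interests) == max_shared_interests]
  let pairsMax := (connections.items.filter (fun q => PySem.Set.len q.2 == maxShared)).map (fun q => q.1)
  -- max([pair[0] * pair[1] for pair in pairs_with_max_shared_interests])
  (PySem.List.max? (pairsMax.map (fun p => p.1 * p.2)) (fun x => x)).getD 0

-- ===== PORT B =====
-- the body of B's inner 'for (q, w) in ts' loop, building (ws, rest)
def pvSplit (p : Int × Int) (ts : List ((Int × Int) × Int)) : PySem.Set Int × List ((Int × Int) × Int) :=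
  ts.foldl (fun acc t =>
    if t.1 == p then (PySem.Set.add acc.1 t.2, acc.2) else (acc.1, acc.2 ++ [t])) (PySem.Set.empty, [])

-- shape of pvSplit (termination of the peel loop needs the second component)
lemma pvSplit_gen (p : Int × Int) (ts : List ((Int × Int) × Int)) : ∀ (a : PySem.Set Int) (b : List ((Int × Int) × Int)),
    ts.foldl (fun acc t =>
      if t.1 == p then (PySem.Set.add acc.1 t.2, acc.2) else (acc.1, acc.2 ++ [t])) (a, b)
    = (((ts.filter (fun t => t.1 == p)).map Prod.snd).foldl PySem.Set.add a,
       b ++ ts.filter (fun t => !(t.1 == p))) := by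
  induction ts with
  | nil => intro a b; simp
  | cons t ts ih =>
    intro a b
    simp only [List.foldl_cons, List.filter_cons]
    by_cases h : (t.1 == p) = true
    · simp only [h, if_true, Bool.not_true, Bool.false_eq_true, if_false]
      rw [ih]
      rfl
    · have h' : (t.1 == p) = false := by simpa using h
      simp only [h', Bool.false_eq_true, if_false, Bool.not_false, if_true]
      rw [ih]
      simp

lemma pvSplit_eq (p : Int × Int) (ts : List ((Int × Int) × Int)) :
    pvSplit p ts = (PySem.Set.ofList ((ts.filter (fun t => t.1 == p)).map Prod.snd),
                    ts.filter (fun t => !(t.1 == p))) := by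
  unfold pvSplit
  rw [pvSplit_gen]
  rfl

lemma pvSplit_snd_len (p : Int × Int) (w : Int) (ts : List ((Int × Int) × Int)) :
    (pvSplit p ((p, w) :: ts)).2.length < ((p, w) :: ts).length := by
  rw [pvSplit_eq]
  simp only [List.filter_cons]
  simp only [beq_self_eq_true, Bool.not_true, Bool.false_eq_true, if_false, List.length_cons]
  exact Nat.lt_succ_of_le (List.length_filter_le _ _)

-- 'while ts: …' with the running (best_c, best_p)
def pvPeel : List ((Int × Int) × Int) → Int × Int → Int × Int
  | [], best => best
  | (p, w) :: ts, best =>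
      let s := pvSplit p ((p, w) :: ts)
      let c : Int := PySem.Set.len s.1
      let pr := p.1 * p.2
      pvPeel s.2 (if best.1 < c ∨ (c == best.1 ∧ best.2 < pr) then (c, pr) else best)
  termination_by ts _ => ts.length
  decreasing_by exact pvSplit_snd_len p w ts

def sharedInterest_alt (friends_nodes : Int) (friends_edges : Int) (friends_from : List Int) (friends_to : List Int) (friends_weight : List Int) : Int :=
  -- triples.append(((u, v), fw[i])) with u, v swapped into order
  let triples := (PySem.List.pyRange 0 friends_edges 1).foldl (fun acc i =>
    let u := (PySem.List.pyGet? friends_from i).getD 0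
    let v := (PySem.List.pyGet? friends_to i).getD 0
    acc ++ [((if v < u then (v, u) else (u, v)), (PySem.List.pyGet? friends_weight i).getD 0)]) []
  (pvPeel triples ((0 : Int), (0 : Int))).2

-- ===== PRECONDITION & SPEC =====
-- Pre_ is exactly where the Python A returns: friends_edges ≥ 1 (on ≤ 0 the dict is
-- empty and max() raises ValueError) and friends_edges within all three list lengths
-- (otherwise the index loop raises IndexError).
def Pre_sharedInterest (friends_nodes : Int) (friends_edges : Int) (friends_from : List Int) (friends_to : List Int) (friends_weight : List Int) : Prop :=
  1 ≤ friends_edges ∧ friends_edges ≤ friends_from.length ∧ friends_edges ≤ friends_to.length ∧ friends_edges ≤ friends_weight.length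
instance (friends_nodes : Int) (friends_edges : Int) (friends_from : List Int) (friends_to : List Int) (friends_weight : List Int) : Decidable (Pre_sharedInterest friends_nodes friends_edges friends_from friends_to friends_weight) := by unfold Pre_sharedInterest; infer_instance

def pvWitness_sharedInterest : Int × Int × List Int × List Int × List Int := (6, 3, [1, 2, 2], [2, 3, 1], [1, 1, 2])


def Spec_sharedInterest (friends_nodes : Int) (friends_edges : Int) (friends_from : List Int) (friends_to : List Int) (friends_weight : List Int) (out : Int) : Prop := out = sharedInterest_alt friends_nodes friends_edges friends_from friends_to friends_weight
instance (friends_nodes : Int) (friends_edges : Int) (friends_from : List Int) (friends_to : List Int) (friends_weight : List Int) (out : Int) : Decidable (Spec_sharedInterest friends_nodes friends_edges friends_from friends_to friends_weight out) := by unfold Spec_sharedInterest; infer_instance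

-- ===== CLAIM (what is proved, stated in full; the proofs are below) =====
def Claim_equal_sharedInterest : Prop := ∀ (friends_nodes : Int) (friends_edges : Int) (friends_from : List Int) (friends_to : List Int) (friends_weight : List Int), Dom_sharedInterest friends_nodes friends_edges friends_from friends_to friends_weight → Pre_sharedInterest friends_nodes friends_edges friends_from friends_to friends_weight → Spec_sharedInterest friends_nodes friends_edges friends_from friends_to friends_weight (sharedInterest friends_nodes friends_edges friends_from friends_to friends_weight)


-- ===== LEMMAS AND PROOFS =====

-- the normalised triple ((min, max), w) of an edge
def pvNorm (t : (Int × Int) × Int) : (Int × Int) × Int :=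
  ((if t.1.2 < t.1.1 then (t.1.2, t.1.1) else (t.1.1, t.1.2)), t.2)

-- A's per-edge step, abstracted over the raw edge triple
def stepA (d : PySem.Dict (Int × Int) (PySem.Set Int)) (t : (Int × Int) × Int) : PySem.Dict (Int × Int) (PySem.Set Int) :=
  let pair : Int × Int := if t.1.2 < t.1.1 then (t.1.2, t.1.1) else (t.1.1, t.1.2)
  let d := if d.contains pair then d else d.insert pair PySem.Set.empty
  d.modify pair PySem.Set.empty (fun s => PySem.Set.add s t.2)

-- the same step on an already-normalised triple, as a single insert
def stepAn (d : PySem.Dict (Int × Int) (PySem.Set Int)) (t : (Int × Int) × Int) : PySem.Dict (Int × Int) (PySem.Set Int) :=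
  d.insert t.1 (PySem.Set.add (d.getD t.1 PySem.Set.empty) t.2)

-- A's read phase as a function of the built dictionary
def readPhase (connections : PySem.Dict (Int × Int) (PySem.Set Int)) : Int :=
  (PySem.List.max? ((((connections.items.filter (fun q => PySem.Set.len q.2 ==
      (PySem.List.max? (connections.values.map (fun s => PySem.Set.len s)) (fun x => x)).getD 0)).map
      (fun q => q.1)).map (fun p => p.1 * p.2))) (fun x => x)).getD 0

lemma double_insert (d : PySem.Dict (Int × Int) (PySem.Set Int)) (p : Int × Int) (w : Int)
    (hc : d.contains p = false) :
    (d.insert p PySem.Set.empty).insert p (PySem.Set.add ((d.insert p PySem.Set.empty).getD p PySem.Set.empty) w)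
      = d.insert p (PySem.Set.add (d.getD p PySem.Set.empty) w) := by
  rw [PySem.Dict.getD_insert_self, PySem.Dict.getD_of_not_contains _ _ hc]
  apply PySem.Dict.ext
  have hnk : ∀ q ∈ d.items, (q.1 == p) = false := by
    intro q hq
    by_contra h
    simp only [Bool.not_eq_false, beq_iff_eq] at h
    have : p ∈ d.keys := by
      simp only [PySem.Dict.keys]; exact List.mem_map.2 ⟨q, hq, h⟩
    rw [← PySem.Dict.contains_iff_mem_keys] at this
    simp [hc] at this
  rw [PySem.Dict.items_insert_of_contains _ _ (PySem.Dict.contains_insert_self _ _ _),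
      PySem.Dict.items_insert_of_not_contains _ _ hc,
      PySem.Dict.items_insert_of_not_contains _ _ hc]
  simp only [List.map_append]
  rw [List.map_congr_left (g := id) (fun q hq => by simp [hnk q hq])]
  simp

lemma stepA_eq_stepAn (d : PySem.Dict (Int × Int) (PySem.Set Int)) (t : (Int × Int) × Int) :
    stepA d t = stepAn d (pvNorm t) := by
  set p : Int × Int := if t.1.2 < t.1.1 then (t.1.2, t.1.1) else (t.1.1, t.1.2) with hp
  by_cases hc : d.contains p = true
  · simp only [stepA, ← hp, hc, if_true]
    rfl
  · have hc' : d.contains p = false := by simpa using hc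
    simp only [stepA, ← hp, hc', Bool.false_eq_true, if_false]
    exact double_insert d p t.2 hc'

-- distinct weights of pair p in a normalised triple list
def wOf (N : List ((Int × Int) × Int)) (p : Int × Int) : List Int :=
  PySem.Set.ofList ((N.filter (fun t => t.1 == p)).map Prod.snd)

-- the group summary both programs compute: pair list without duplicates,
-- the pairs of N, and for each its distinct-weight count
def GoodG (N l : List ((Int × Int) × Int)) : Prop :=
  (l.map Prod.fst).Nodup ∧ (∀ p, p ∈ l.map Prod.fst ↔ p ∈ N.map Prod.fst) ∧
  ∀ q ∈ l, q.2 = ((wOf N q.1).length : Int)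

def groupsOf : List ((Int × Int) × Int) → List ((Int × Int) × Int)
  | [] => []
  | (p, w) :: ts =>
      (p, ((pvSplit p ((p, w) :: ts)).1.length : Int)) :: groupsOf (pvSplit p ((p, w) :: ts)).2
  termination_by ts => ts.length
  decreasing_by exact pvSplit_snd_len p w ts

-- the running-best combining step of pvPeel
def comb (best : Int × Int) (kv : (Int × Int) × Int) : Int × Int :=
  let pr := kv.1.1 * kv.1.2
  if best.1 < kv.2 ∨ (kv.2 == best.1 ∧ best.2 < pr) then (kv.2, pr) else best

lemma peel_fold (ts : List ((Int × Int) × Int)) : ∀ best,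
    pvPeel ts best = (groupsOf ts).foldl comb best := by
  induction ts using groupsOf.induct with
  | case1 => intro best; simp [pvPeel, groupsOf]
  | case2 p w ts ih =>
    intro best
    rw [pvPeel, groupsOf]
    simp only [List.foldl_cons]
    rw [ih]
    rfl

-- running max (max() of a nonempty list)
def imax : List Int → Int
  | [] => 0
  | x :: t => t.foldl max x

lemma imax_eq_max? (xs : List Int) (h : xs ≠ []) : (PySem.List.max? xs (fun x => x)).getD 0 = imax xs := by
  cases xs with
  | nil => simp at h
  | cons x t => simp [PySem.List.max?_id_cons, imax]

lemma imax_append_singleton (xs : List Int) (y : Int) :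
    imax (xs ++ [y]) = if xs = [] then y else max (imax xs) y := by
  cases xs with
  | nil => simp [imax]
  | cons x t => simp [imax, List.foldl_append]

lemma le_imax (xs : List Int) (x : Int) (hx : x ∈ xs) : x ≤ imax xs := by
  cases xs with
  | nil => simp at hx
  | cons a t =>
    rcases List.mem_cons.1 hx with h | h
    · subst h; exact (PySem.List.le_foldl_max t x).1
    · exact (PySem.List.le_foldl_max t a).2 x h

lemma imax_mem (xs : List Int) (h : xs ≠ []) : imax xs ∈ xs := by
  cases xs with
  | nil => simp at h
  | cons a t =>
    rcases PySem.List.foldl_max_mem t a with h1 | h1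
    · simp [imax, h1]
    · simp only [imax]; exact List.mem_cons_of_mem _ h1

lemma imax_perm {xs ys : List Int} (h : xs.Perm ys) : imax xs = imax ys := by
  cases hx : xs with
  | nil =>
    subst hx
    rw [List.nil_perm.1 h]
  | cons a t =>
    have hxne : xs ≠ [] := by rw [hx]; simp
    have hyne : ys ≠ [] := fun hn => hxne (List.perm_nil.1 (hn ▸ h))
    rw [← hx]
    apply le_antisymm
    · exact le_imax ys _ (h.mem_iff.1 (imax_mem xs hxne))
    · exact le_imax xs _ (h.mem_iff.2 (imax_mem ys hyne))

-- both programs' answer as (max count, max product among max-count pairs)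
def bestOf (l : List ((Int × Int) × Int)) : Int × Int :=
  (imax (l.map Prod.snd),
   imax ((l.filter (fun q => q.2 == imax (l.map Prod.snd))).map (fun q => q.1.1 * q.1.2)))

lemma argmax_fold (l : List ((Int × Int) × Int)) (h1 : ∀ p ∈ l, 1 ≤ p.2) (h0 : l ≠ []) :
    l.foldl comb ((0 : Int), (0 : Int)) = bestOf l := by
  unfold bestOf
  induction l using List.reverseRecOn with
  | nil => simp at h0
  | append_singleton t x ih =>
    rw [List.foldl_append, List.foldl_cons, List.foldl_nil]
    by_cases ht : t = []
    · subst ht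
      have hx : (1 : Int) ≤ x.2 := h1 x (by simp)
      simp only [List.nil_append, List.foldl_nil, List.map_cons, List.map_nil]
      rw [comb, if_pos (Or.inl (by omega))]
      simp [imax]
    · have ih' := ih (fun p hp => h1 p (by simp [hp])) ht
      rw [ih']
      have htm : t.map (fun p => p.2) ≠ [] := by simpa using ht
      set M := imax (t.map (fun p => p.2)) with hM
      have hMmem : M ∈ t.map (fun p => p.2) := imax_mem _ htm
      obtain ⟨q, hq, hqM⟩ := List.mem_map.1 hMmem
      have hM' : imax ((t ++ [x]).map (fun p => p.2)) = max M x.2 := by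
        rw [List.map_append, List.map_cons, List.map_nil, imax_append_singleton, if_neg htm]
      rcases lt_trichotomy M x.2 with hlt | heq | hgt
      · rw [comb, if_pos (Or.inl hlt)]
        have hmax : max M x.2 = x.2 := max_eq_right hlt.le
        have hfilt : t.filter (fun p => p.2 == imax ((t ++ [x]).map (fun p => p.2))) = [] := by
          rw [hM', hmax]
          refine List.filter_eq_nil_iff.2 ?_
          intro p hp
          have : p.2 ≤ M := le_imax _ _ (List.mem_map_of_mem hp)
          simp only [beq_iff_eq]
          omega
        rw [hM', hmax]
        rw [List.filter_append, hM', hmax] at *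
        rw [hfilt]
        simp [imax]
      · have hmax : max M x.2 = x.2 := by rw [heq, max_self]
        rw [hM', hmax, heq]
        have hfil : (t ++ [x]).filter (fun p => p.2 == x.2) = t.filter (fun p => p.2 == x.2) ++ [x] := by
          simp [List.filter_append]
        have hPt : t.filter (fun p => p.2 == x.2) ≠ [] :=
          List.ne_nil_of_mem (List.mem_filter.2 ⟨hq, by simp [hqM, heq]⟩)
        have hne' : ¬(List.map (fun p => p.1.1 * p.1.2) (t.filter (fun p => p.2 == x.2)) = []) := by
          simpa [List.map_eq_nil_iff] using hPt
        by_cases hpf : imax (List.map (fun p => p.1.1 * p.1.2) (t.filter (fun p => p.2 == x.2))) < x.1.1 * x.1.2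
        · rw [comb, if_pos (Or.inr ⟨by simp, hpf⟩)]
          rw [hfil, List.map_append, List.map_cons, List.map_nil, imax_append_singleton,
              if_neg hne', max_eq_right hpf.le]
        · rw [comb, if_neg (by simp; omega)]
          rw [hfil, List.map_append, List.map_cons, List.map_nil, imax_append_singleton,
              if_neg hne', max_eq_left (by omega)]
      · have hmax : max M x.2 = M := max_eq_left hgt.le
        rw [comb, if_neg (by simp; omega), hM', hmax]
        rw [List.filter_append]
        have : List.filter (fun p => p.2 == M) [x] = [] := by
          simp only [List.filter_cons, List.filter_nil]
          rw [if_neg (by simp; omega)]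
        rw [this, List.append_nil]

lemma bestOf_perm {l1 l2 : List ((Int × Int) × Int)} (h : l1.Perm l2) : bestOf l1 = bestOf l2 := by
  unfold bestOf
  have hM : imax (l1.map Prod.snd) = imax (l2.map Prod.snd) := imax_perm (h.map _)
  rw [hM]
  exact Prod.ext rfl (imax_perm ((h.filter _).map _))

-- B's group list satisfies GoodG
lemma wOf_filter_ne (N : List ((Int × Int) × Int)) (p q : Int × Int) (hq : q ≠ p) :
    wOf (N.filter (fun t => !(t.1 == p))) q = wOf N q := by
  unfold wOf
  rw [List.filter_filter]
  congr 2
  apply List.filter_congr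
  intro t _
  by_cases h : (t.1 == q) = true
  · have : t.1 = q := by simpa using h
    have : (t.1 == p) = false := by simp [this, hq]
    simp [h, this]
  · simp only [Bool.not_eq_true] at h
    simp [h]

lemma groups_good (N : List ((Int × Int) × Int)) : GoodG N (groupsOf N) := by
  induction N using groupsOf.induct with
  | case1 => exact ⟨by simp [groupsOf], by simp [groupsOf], by simp [groupsOf]⟩
  | case2 p w ts ih =>
    set N := (p, w) :: ts with hN
    have hrest : (pvSplit p N).2 = N.filter (fun t => !(t.1 == p)) := by
      rw [pvSplit_eq]
    have hws : ((pvSplit p N).1.length : Int) = ((wOf N p).length : Int) := by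
      rw [pvSplit_eq]; rfl
    rw [hrest] at ih
    obtain ⟨ihnd, ihmem, ihcnt⟩ := ih
    have hnotp : p ∉ (N.filter (fun t => !(t.1 == p))).map Prod.fst := by
      intro hmem
      obtain ⟨t, ht, hfst⟩ := List.mem_map.1 hmem
      have := (List.mem_filter.1 ht).2
      simp [hfst] at this
    have hgroups : groupsOf N = (p, ((pvSplit p N).1.length : Int)) :: groupsOf (N.filter (fun t => !(t.1 == p))) := by
      rw [groupsOf, hrest]
    rw [hgroups]
    refine ⟨?_, ?_, ?_⟩
    · simp only [List.map_cons, List.nodup_cons]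
      exact ⟨fun h => hnotp ((ihmem p).1 h), ihnd⟩
    · intro q
      simp only [List.map_cons, List.mem_cons]
      rw [ihmem]
      constructor
      · rintro (hq | hq)
        · rw [hq]
          exact List.mem_map.2 ⟨(p, w), by simp [hN], rfl⟩
        · obtain ⟨t, ht, hfst⟩ := List.mem_map.1 hq
          exact List.mem_map.2 ⟨t, (List.mem_filter.1 ht).1, hfst⟩
      · intro hq
        obtain ⟨t, ht, hfst⟩ := List.mem_map.1 hq
        by_cases htp : t.1 = p
        · left; rw [← hfst, htp]
        · right
          refine List.mem_map.2 ⟨t, List.mem_filter.2 ⟨ht, by simp [htp]⟩, hfst⟩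
    · intro q hq
      rcases List.mem_cons.1 hq with rfl | hq
      · exact hws
      · have hq1 : q.1 ∈ (N.filter (fun t => !(t.1 == p))).map Prod.fst :=
          (ihmem q.1).1 (List.mem_map_of_mem hq)
        have hq1' : q.1 ≠ p := fun h => hnotp (h ▸ hq1)
        rw [ihcnt q hq, wOf_filter_ne N p q.1 hq1']

-- A's dictionary: nodup keys, and each pair maps to its distinct-weight list
lemma wOf_append (N : List ((Int × Int) × Int)) (t : (Int × Int) × Int) (p : Int × Int) :
    wOf (N ++ [t]) p = if p = t.1 then PySem.Set.add (wOf N p) t.2 else wOf N p := by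
  unfold wOf
  rw [List.filter_append, List.map_append]
  by_cases h : p = t.1
  · have : (t.1 == p) = true := by simp [h]
    simp only [List.filter_cons, List.filter_nil, this, if_true, if_pos h,
      List.map_cons, List.map_nil]
    rw [PySem.Set.ofList_eq_foldl, PySem.Set.ofList_eq_foldl, List.foldl_append]
    rfl
  · have : (t.1 == p) = false := by simp; intro hh; exact h hh.symm
    simp [this, h]

lemma wOf_not_mem (N : List ((Int × Int) × Int)) (p : Int × Int) (h : p ∉ N.map Prod.fst) :
    wOf N p = [] := by
  unfold wOf
  have : N.filter (fun t => t.1 == p) = [] := by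
    refine List.filter_eq_nil_iff.2 ?_
    intro t ht
    simp only [ne_eq, beq_iff_eq]
    intro hh
    exact h (List.mem_map.2 ⟨t, ht, hh⟩)
  rw [this]
  rfl

lemma dict_char (N : List ((Int × Int) × Int)) :
    (N.foldl stepAn PySem.Dict.empty).keys.Nodup ∧
    ∀ p, (N.foldl stepAn PySem.Dict.empty).get? p =
      if p ∈ N.map Prod.fst then some (wOf N p) else none := by
  induction N using List.reverseRecOn with
  | nil => exact ⟨List.nodup_nil, fun p => by simp [PySem.Dict.get?_empty]⟩
  | append_singleton N t ih =>
    obtain ⟨ihnd, ihget⟩ := ih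
    rw [List.foldl_append, List.foldl_cons, List.foldl_nil]
    set d := N.foldl stepAn PySem.Dict.empty with hd
    have hcont : d.contains t.1 = true ↔ t.1 ∈ N.map Prod.fst := by
      rw [PySem.Dict.contains_eq_isSome_get?, ihget t.1]
      by_cases h : t.1 ∈ N.map Prod.fst <;> simp [h]
    have hgd : d.getD t.1 PySem.Set.empty = wOf N t.1 := by
      by_cases h : t.1 ∈ N.map Prod.fst
      · exact PySem.Dict.getD_of_get?_eq_some _ _ (by rw [ihget]; simp [h])
      · rw [PySem.Dict.getD_of_not_contains _ _ (by
          by_contra hb; simp only [Bool.not_eq_false] at hb; exact h (hcont.1 hb))]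
        rw [wOf_not_mem N t.1 h]
        rfl
    constructor
    · show (d.insert t.1 _).keys.Nodup
      by_cases h : d.contains t.1 = true
      · rw [PySem.Dict.keys_insert_of_contains _ _ h]; exact ihnd
      · have h' : d.contains t.1 = false := by simpa using h
        rw [PySem.Dict.keys_insert_of_not_contains _ _ h']
        have hpk : t.1 ∉ d.keys := fun hk =>
          h ((PySem.Dict.contains_iff_mem_keys _ _).2 hk)
        simp only [List.nodup_append, List.nodup_singleton, true_and, List.mem_singleton]
        exact ⟨ihnd, fun a ha b hb hab => hpk ((hb ▸ hab) ▸ ha)⟩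
    · intro p
      rw [show stepAn d t = d.insert t.1 (PySem.Set.add (d.getD t.1 PySem.Set.empty) t.2) from rfl]
      rw [PySem.Dict.get?_insert]
      by_cases h : p = t.1
      · rw [if_pos h, if_pos (by rw [List.map_append]; simp [h])]
        rw [wOf_append, if_pos h, h, hgd]
      · rw [if_neg h, ihget p, wOf_append, if_neg h]
        have : p ∈ (N ++ [t]).map Prod.fst ↔ p ∈ N.map Prod.fst := by
          rw [List.map_append]
          simp only [List.map_cons, List.map_nil, List.mem_append, List.mem_singleton]
          exact ⟨fun hh => hh.resolve_right h, Or.inl⟩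
        by_cases hm : p ∈ N.map Prod.fst
        · rw [if_pos hm, if_pos (this.2 hm)]
        · rw [if_neg hm, if_neg (fun hh => hm (this.1 hh))]

lemma dict_good (N : List ((Int × Int) × Int)) :
    GoodG N ((N.foldl stepAn PySem.Dict.empty).items.map (fun q => (q.1, PySem.Set.len q.2))) := by
  obtain ⟨hnd, hget⟩ := dict_char N
  set d := N.foldl stepAn PySem.Dict.empty with hd
  have hfst : (d.items.map (fun q => (q.1, PySem.Set.len q.2))).map Prod.fst = d.keys := by
    rw [List.map_map]; rfl
  refine ⟨by rw [hfst]; exact hnd, ?_, ?_⟩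
  · intro p
    rw [hfst, ← PySem.Dict.contains_iff_mem_keys, PySem.Dict.contains_eq_isSome_get?, hget p]
    by_cases h : p ∈ N.map Prod.fst <;> simp [h]
  · intro q hq
    obtain ⟨⟨k, s⟩, hmem, rfl⟩ := List.mem_map.1 hq
    have hg : d.get? k = some s := PySem.Dict.get?_of_mem_items _ hmem hnd
    rw [hget k] at hg
    by_cases h : k ∈ N.map Prod.fst
    · rw [if_pos h] at hg
      injection hg with hs
      simp only [PySem.Set.len, ← hs]
    · rw [if_neg h] at hg; cases hg

-- two GoodG lists are permutations of each other
lemma map_pair_eq (l : List ((Int × Int) × Int)) (f : Int × Int → Int)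
    (h : ∀ q ∈ l, q.2 = f q.1) : l = (l.map Prod.fst).map (fun p => (p, f p)) := by
  induction l with
  | nil => rfl
  | cons q t ih =>
    simp only [List.map_cons]
    rw [← ih (fun x hx => h x (List.mem_cons_of_mem _ hx)), ← h q (List.mem_cons_self)]

lemma good_perm {N l1 l2 : List ((Int × Int) × Int)} (h1 : GoodG N l1) (h2 : GoodG N l2) :
    l1.Perm l2 := by
  obtain ⟨h1n, h1m, h1c⟩ := h1
  obtain ⟨h2n, h2m, h2c⟩ := h2
  have hp : (l1.map Prod.fst).Perm (l2.map Prod.fst) :=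
    (List.perm_ext_iff_of_nodup h1n h2n).2 (fun p => (h1m p).trans (h2m p).symm)
  rw [map_pair_eq l1 (fun p => ((wOf N p).length : Int)) h1c,
      map_pair_eq l2 (fun p => ((wOf N p).length : Int)) h2c]
  exact hp.map _

-- counts in a GoodG list are ≥ 1, and the list is nonempty when N is
lemma good_counts_pos {N l : List ((Int × Int) × Int)} (h : GoodG N l) :
    ∀ q ∈ l, (1 : Int) ≤ q.2 := by
  obtain ⟨-, hm, hc⟩ := h
  intro q hq
  have hq1 : q.1 ∈ N.map Prod.fst := (hm q.1).1 (List.mem_map_of_mem hq)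
  obtain ⟨t, ht, hfst⟩ := List.mem_map.1 hq1
  have hmem : t.2 ∈ wOf N q.1 := by
    unfold wOf
    rw [PySem.Set.mem_ofList]
    exact List.mem_map_of_mem (List.mem_filter.2 ⟨ht, by simp [hfst]⟩)
  have : 0 < (wOf N q.1).length := List.length_pos_iff.2 (List.ne_nil_of_mem hmem)
  rw [hc q hq]
  omega

lemma good_ne_nil {N l : List ((Int × Int) × Int)} (h : GoodG N l) (hN : N ≠ []) : l ≠ [] := by
  obtain ⟨-, hm, -⟩ := h
  obtain ⟨t, ht⟩ := List.exists_mem_of_ne_nil N hN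
  have := (hm t.1).2 (List.mem_map_of_mem ht)
  intro hnil
  rw [hnil] at this
  simp at this

-- A's read phase equals the bestOf of its group summary
lemma read_eq_bestOf (d : PySem.Dict (Int × Int) (PySem.Set Int))
    (hne : d.items.map (fun q => (q.1, PySem.Set.len q.2)) ≠ []) :
    readPhase d = (bestOf (d.items.map (fun q => (q.1, PySem.Set.len q.2)))).2 := by
  set g := d.items.map (fun q => (q.1, PySem.Set.len q.2)) with hg
  unfold readPhase bestOf
  have hval : d.values.map (fun s => PySem.Set.len s) = g.map Prod.snd := by
    rw [hg]
    simp only [PySem.Dict.values, List.map_map]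
    rfl
  have hmne : g.map Prod.snd ≠ [] := by simpa using hne
  rw [hval, imax_eq_max? _ hmne]
  set M := imax (g.map Prod.snd) with hM
  have hfilter : ((d.items.filter (fun q => PySem.Set.len q.2 == M)).map (fun q => q.1)).map (fun p => p.1 * p.2)
      = (g.filter (fun p => p.2 == M)).map (fun p => p.1.1 * p.1.2) := by
    rw [hg, List.filter_map, List.map_map, List.map_map]
    rfl
  rw [hfilter]
  have hMmem : M ∈ g.map Prod.snd := imax_mem _ hmne
  obtain ⟨q, hq, hqM⟩ := List.mem_map.1 hMmem
  have hfne : (g.filter (fun p => p.2 == M)).map (fun p => p.1.1 * p.1.2) ≠ [] := by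
    have : q ∈ g.filter (fun p => p.2 == M) := List.mem_filter.2 ⟨hq, by simp [hqM]⟩
    simpa [List.map_eq_nil_iff] using List.ne_nil_of_mem this
  rw [imax_eq_max? _ hfne]

-- range-index loop = zip loop over the truncated lists
lemma range_fold_eq_zip_fold {σ : Type} (F : σ → Int → Int → Int → σ) (xs ys zs : List Int) (n : Nat)
    (hx : n ≤ xs.length) (hy : n ≤ ys.length) (hz : n ≤ zs.length) : ∀ init : σ,
    ((List.range n).map (fun k => Int.ofNat k)).foldl (fun s i => F s ((PySem.List.pyGet? xs i).getD 0) ((PySem.List.pyGet? ys i).getD 0) ((PySem.List.pyGet? zs i).getD 0)) init =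
    (((xs.take n).zip (ys.take n)).zip (zs.take n)).foldl (fun s t => F s t.1.1 t.1.2 t.2) init := by
  induction n with
  | zero => intro init; simp
  | succ n ih =>
    intro init
    have hx' : n < xs.length := by omega
    have hy' : n < ys.length := by omega
    have hz' : n < zs.length := by omega
    rw [List.range_succ, List.map_append, List.foldl_append, ih (by omega) (by omega) (by omega)]
    have htx : xs.take (n + 1) = xs.take n ++ [xs[n]] := by
      rw [List.take_add_one, List.getElem?_eq_getElem hx']; rfl
    have hty : ys.take (n + 1) = ys.take n ++ [ys[n]] := by
      rw [List.take_add_one, List.getElem?_eq_getElem hy']; rfl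
    have htz : zs.take (n + 1) = zs.take n ++ [zs[n]] := by
      rw [List.take_add_one, List.getElem?_eq_getElem hz']; rfl
    rw [htx, hty, htz,
        List.zip_append (by simp [List.length_take]; omega),
        List.zip_append (by simp [List.length_take, List.length_zip]; omega),
        List.foldl_append]
    simp [hx', hy', hz']

-- ===== VERDICT (by name: the statement is the Claim_ definition above) =====
theorem sharedInterest_spec : Claim_equal_sharedInterest := by
  intro fn fe ff ft fw hdom hpre
  obtain ⟨h1, h2, h3, h4⟩ := hpre
  unfold Spec_sharedInterest
  set n := fe.toNat with hn
  have hfe : fe = (n : Int) := by omega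
  have hnx : n ≤ ff.length := by omega
  have hny : n ≤ ft.length := by omega
  have hnz : n ≤ fw.length := by omega
  have hn1 : 1 ≤ n := by omega
  set L := ((ff.take n).zip (ft.take n)).zip (fw.take n) with hL
  have hLne : L ≠ [] := by
    have : L.length = n := by
      simp [hL, List.length_zip, List.length_take]
      omega
    intro hnil
    rw [hnil] at this
    simp at this
    omega
  set N := L.map pvNorm with hNdef
  have hNne : N ≠ [] := by simpa [hNdef] using hLne
  -- A's value
  have hfoldA : ((List.range n).map (fun k => Int.ofNat k)).foldl
      (fun d i => stepA d (((PySem.List.pyGet? ff i).getD 0, (PySem.List.pyGet? ft i).getD 0), (PySem.List.pyGet? fw i).getD 0))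
      PySem.Dict.empty = N.foldl stepAn PySem.Dict.empty := by
    rw [range_fold_eq_zip_fold (fun d a b w => stepA d ((a, b), w)) ff ft fw n hnx hny hnz]
    rw [hNdef, List.foldl_map]
    congr 1
    funext d t
    exact stepA_eq_stepAn d t
  have hA : sharedInterest fn fe ff ft fw = readPhase (N.foldl stepAn PySem.Dict.empty) := by
    simp only [sharedInterest]
    rw [hfe, PySem.List.pyRange_zero_natCast]
    exact congrArg readPhase hfoldA
  -- B's value
  have hfoldB : ((List.range n).map (fun k => Int.ofNat k)).foldl
      (fun acc i => acc ++ [pvNorm (((PySem.List.pyGet? ff i).getD 0, (PySem.List.pyGet? ft i).getD 0), (PySem.List.pyGet? fw i).getD 0)])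
      ([] : List ((Int × Int) × Int)) = N := by
    rw [range_fold_eq_zip_fold (fun acc a b w => acc ++ [pvNorm ((a, b), w)]) ff ft fw n hnx hny hnz]
    rw [hNdef, PySem.List.foldl_append_singleton_eq_map]
    simp only [List.nil_append]
    rfl
  have hB : sharedInterest_alt fn fe ff ft fw = (pvPeel N ((0 : Int), (0 : Int))).2 := by
    simp only [sharedInterest_alt]
    rw [hfe, PySem.List.pyRange_zero_natCast]
    exact congrArg (fun l => (pvPeel l ((0 : Int), (0 : Int))).2) hfoldB
  -- equality through the group summaries
  have hgoodA := dict_good N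
  have hgoodB := groups_good N
  have hAne := good_ne_nil hgoodA hNne
  have hBne := good_ne_nil hgoodB hNne
  rw [hA, hB, peel_fold, argmax_fold _ (good_counts_pos hgoodB) hBne,
      read_eq_bestOf _ hAne, bestOf_perm (good_perm hgoodA hgoodB)]
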